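-- pv_equiv track=rewrite | github.com/pypi-data/pypi-mirror-40 | packages/trlib/trlib-1.0.1-py3-none-any.whl/trlib/parser/svUtils.py | generateHeadersFromRequestLine
-- ===== SOURCE A (Python) =====
-- def generateHeadersFromRequestLine(headerLine):
--     if not headerLine:
--         return None
--
--     headers = {}
--
--     for pair in headerLine.split("\r\n"):
--         # test to get rid of the empty split part that is from \r\n\r\n
--         if pair:
--             key, val = pair.split(":", 1)
--
--             val = val.strip()
--
--             if key in headers:
--                 headers[key] = headers[key] + ", {0}".format(val)
--             else:
--                 headers[key] = val
--
--     return headers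
-- ===== SOURCE B (Python) =====
-- def generateHeadersFromRequestLine(headerLine):
--     if not headerLine:
--         return None
--
--     # pass 1: flatten into an ordered list of (key, stripped value) pairs
--     pairs = []
--     for part in headerLine.split("\r\n"):
--         if part:
--             key, val = part.split(":", 1)
--             pairs.append((key, val.strip()))
--
--     # pass 2: keys in first-occurrence order
--     seen = []
--     for key, _ in pairs:
--         if key not in seen:
--             seen.append(key)
--
--     # pass 3: one comma-join per key over the flat pair list
--     return {key: ", ".join(v for k, v in pairs if k == key) for key in seen}
-- ===== Notes on version B (the rewrite author's own statement) =====
-- stated objective: alternative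
-- what changed: Replaces A's single dict-updating loop (concatenate-or-assign per key) by three dict-free passes: flatten the header line into an ordered list of (key, value) pairs, dedup the keys in first-occurrence order, then build the result with one comma-join per key over a filter of the flat pair list.
import Mathlib
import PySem

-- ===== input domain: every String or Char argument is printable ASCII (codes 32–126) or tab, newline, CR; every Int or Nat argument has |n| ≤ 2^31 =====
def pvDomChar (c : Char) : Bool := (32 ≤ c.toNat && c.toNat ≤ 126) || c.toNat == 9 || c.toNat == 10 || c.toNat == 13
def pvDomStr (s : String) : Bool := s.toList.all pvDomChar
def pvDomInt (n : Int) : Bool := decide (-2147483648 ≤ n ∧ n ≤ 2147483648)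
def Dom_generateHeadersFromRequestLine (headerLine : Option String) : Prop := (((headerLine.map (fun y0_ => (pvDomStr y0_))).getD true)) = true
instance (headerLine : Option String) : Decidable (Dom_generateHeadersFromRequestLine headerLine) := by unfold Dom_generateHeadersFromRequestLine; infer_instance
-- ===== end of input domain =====

-- B replaces A's dict-updating loop by three dict-free passes: flatten into an ordered
-- (key, value) pair list, dedup keys in first-occurrence order, one comma-join per key
-- over a filter of the pair list (alternative decomposition, similar cost).

-- ===== PORT A =====
-- one loop step of A: returns none exactly where Python raises ValueError (a nonempty part with no colon)
def pvStepA (headers : PySem.Dict String String) (pair : String) : Option (PySem.Dict String String) :=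
  if pair ≠ "" then
    match PySem.Str.splitMax? pair ":" 1 with
    | some (key :: val :: _) =>
        let val := PySem.Str.strip val
        some (if headers.contains key then
                -- headers[key] cannot raise KeyError in this branch, so getD's default is never used
                headers.insert key (headers.getD key "" ++ ", " ++ val)
              else headers.insert key val)
    | _ => none
  else some headers

def generateHeadersFromRequestLine (headerLine : Option String) : Option (List (String × String)) :=
  match headerLine with
  | none => none
  | some s =>
      if s = "" then none
      else
        -- split? is none only for an empty separator, never here
        (((PySem.Str.split? s "\r\n").getD []).foldlM pvStepA PySem.Dict.empty).map PySem.Dict.items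

-- ===== PORT B =====
-- B's pass 1: append each (key, stripped value) to the flat pair list; none where Python raises ValueError
def pvParseStep (pairs : List (String × String)) (part : String) : Option (List (String × String)) :=
  if part ≠ "" then
    match PySem.Str.splitMax? part ":" 1 with
    | some (key :: val :: _) => some (pairs ++ [(key, PySem.Str.strip val)])
    | _ => none
  else some pairs

-- B's passes 2 and 3: keys in first-occurrence order (the 'seen' loop = PySem.Set.ofList),
-- then one comma-join per key over a filter of the flat pair list
def pvBuild (pairs : List (String × String)) : List (String × String) :=
  (PySem.Set.ofList (pairs.map Prod.fst)).map
    (fun key => (key, PySem.Str.join ", " ((pairs.filter (fun q => q.1 == key)).map Prod.snd)))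

def generateHeadersFromRequestLine_alt (headerLine : Option String) : Option (List (String × String)) :=
  match headerLine with
  | none => none
  | some s =>
      if s = "" then none
      else
        (((PySem.Str.split? s "\r\n").getD []).foldlM pvParseStep []).map pvBuild

-- ===== PRECONDITION & SPEC =====
-- Pre_ excludes exactly the inputs where A raises ValueError: a nonempty CRLF-separated part
-- that the two-way split cannot unpack into a key and a value (i.e. a part with no colon).
def Pre_generateHeadersFromRequestLine (headerLine : Option String) : Prop :=
  ((headerLine.map (fun s =>
      ((PySem.Str.split? s "\r\n").getD []).all
        (fun p => p == "" || ((PySem.Str.splitMax? p ":" 1).getD []).length == 2))).getD true) = true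
instance (headerLine : Option String) : Decidable (Pre_generateHeadersFromRequestLine headerLine) := by
  unfold Pre_generateHeadersFromRequestLine; infer_instance

def pvWitness_generateHeadersFromRequestLine : Option String := some "Host: x\r\nAccept: a\r\nAccept: b\r\n\r\n"

def Spec_generateHeadersFromRequestLine (headerLine : Option String) (out : Option (List (String × String))) : Prop := out = generateHeadersFromRequestLine_alt headerLine
instance (headerLine : Option String) (out : Option (List (String × String))) : Decidable (Spec_generateHeadersFromRequestLine headerLine out) := by unfold Spec_generateHeadersFromRequestLine; infer_instance

-- ===== CLAIM (what is proved, stated in full; the proofs are below) =====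
def Claim_equal_generateHeadersFromRequestLine : Prop := ∀ (headerLine : Option String), Dom_generateHeadersFromRequestLine headerLine → Pre_generateHeadersFromRequestLine headerLine → Spec_generateHeadersFromRequestLine headerLine (generateHeadersFromRequestLine headerLine)

-- ===== LEMMAS AND PROOFS =====

lemma pvJoin_singleton (v : String) : PySem.Str.join ", " [v] = v := by
  rw [← String.toList_inj, PySem.Str.toList_join, List.map_singleton,
    PySem.Chars.join_singleton]

lemma chars_join_append (s x : List Char) (l : List (List Char)) (a : List Char) :
    PySem.Chars.join s ((a :: l) ++ [x]) = PySem.Chars.join s (a :: l) ++ s ++ x := by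
  induction l generalizing a with
  | nil => simp [PySem.Chars.join_cons_cons, PySem.Chars.join_singleton]
  | cons b t ih =>
      have h1 : PySem.Chars.join s ((a :: b :: t) ++ [x])
          = a ++ s ++ PySem.Chars.join s ((b :: t) ++ [x]) :=
        PySem.Chars.join_cons_cons s a b (t ++ [x])
      rw [h1, ih b, PySem.Chars.join_cons_cons]
      simp [List.append_assoc]

lemma pvJoin_append (vs : List String) (v : String) (h : vs ≠ []) :
    PySem.Str.join ", " (vs ++ [v]) = PySem.Str.join ", " vs ++ ", " ++ v := by
  rw [← String.toList_inj]
  obtain ⟨a, l, rfl⟩ := List.exists_cons_of_ne_nil h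
  rw [String.toList_append, String.toList_append, PySem.Str.toList_join, PySem.Str.toList_join,
    List.map_append, List.map_cons, List.map_singleton, chars_join_append]

-- the invariant step: A's dict update on (k, v) tracks B's pair-list append
lemma pvInv_step (dA : PySem.Dict String String) (ps : List (String × String)) (k v : String)
    (h : dA.items = pvBuild ps) :
    (if dA.contains k then dA.insert k (dA.getD k "" ++ ", " ++ v)
     else dA.insert k v).items = pvBuild (ps ++ [(k, v)]) := by
  have hkeys : dA.keys = PySem.Set.ofList (ps.map Prod.fst) := by
    simp [PySem.Dict.keys, h, pvBuild, List.map_map, Function.comp_def]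
  have hnodup : dA.keys.Nodup := by rw [hkeys]; exact PySem.Set.nodup_ofList _
  have hofl : (ps ++ [(k, v)]).map Prod.fst = ps.map Prod.fst ++ [k] := by simp
  have hfa : ∀ key : String, (ps ++ [(k, v)]).filter (fun q => q.1 == key)
      = ps.filter (fun q => q.1 == key) ++ if k = key then [(k, v)] else [] := by
    intro key
    rw [List.filter_append]
    by_cases h' : k = key <;> simp [h']
  by_cases hk : k ∈ ps.map Prod.fst
  · -- the key already occurs: in-place overwrite on A's side, appended value joined on B's side
    have hkS : k ∈ PySem.Set.ofList (ps.map Prod.fst) := (PySem.Set.mem_ofList _ _).mpr hk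
    have hcont : dA.contains k = true := by
      rw [PySem.Dict.contains_eq_decide_mem_keys, hkeys]; simpa using hkS
    obtain ⟨q, hqmem, hq1⟩ := List.mem_map.mp hk
    have hfilter_ne : (ps.filter (fun q => q.1 == k)) ≠ [] := by
      have hqf : q ∈ ps.filter (fun q => q.1 == k) := List.mem_filter.mpr ⟨hqmem, by simp [hq1]⟩
      intro hnil
      rw [hnil] at hqf
      exact absurd hqf List.not_mem_nil
    have hgetD : dA.getD k ""
        = PySem.Str.join ", " ((ps.filter (fun q => q.1 == k)).map Prod.snd) := by
      refine PySem.Dict.getD_of_mem_items dA ?_ hnodup ""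
      rw [h]
      exact List.mem_map.mpr ⟨k, hkS, rfl⟩
    rw [if_pos hcont, PySem.Dict.items_insert_of_contains _ _ hcont, h]
    unfold pvBuild
    rw [hofl, PySem.Set.ofList_append_singleton, PySem.Set.add_of_mem hkS, List.map_map]
    refine List.map_congr_left ?_
    intro key hkey
    by_cases hkk : key = k
    · subst hkk
      have hmne : (ps.filter (fun q => q.1 == key)).map Prod.snd ≠ [] :=
        fun e => hfilter_ne (List.map_eq_nil_iff.mp e)
      simp only [Function.comp_def, beq_self_eq_true, if_true, hgetD, hfa,
        List.map_append, List.map_cons, List.map_nil]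
      rw [pvJoin_append _ _ hmne]
    · have hkk' : k ≠ key := fun e => hkk e.symm
      simp [hfa, hkk, hkk']
  · -- fresh key: append on both sides
    have hkS : k ∉ PySem.Set.ofList (ps.map Prod.fst) := fun hm => hk ((PySem.Set.mem_ofList _ _).mp hm)
    have hcont : dA.contains k = false := by
      rw [PySem.Dict.contains_eq_decide_mem_keys, hkeys]; simpa using hkS
    rw [if_neg (by simp [hcont]), PySem.Dict.items_insert_of_not_contains _ _ hcont, h]
    unfold pvBuild
    rw [hofl, PySem.Set.ofList_append_singleton, PySem.Set.add_of_not_mem hkS, List.map_append]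
    congr 1
    · refine List.map_congr_left ?_
      intro key hkey
      have hkk : k ≠ key := fun e => hkS (e ▸ hkey)
      simp [hfa, hkk]
    · have hempty : ps.filter (fun q => q.1 == k) = [] := by
        rw [List.filter_eq_nil_iff]
        intro q hq
        simp only [beq_iff_eq]
        exact fun e => hk (List.mem_map.mpr ⟨q, hq, e⟩)
      simp [hfa, hempty, pvJoin_singleton]

lemma pvLoop (parts : List String) (dA : PySem.Dict String String)
    (ps : List (String × String)) (h : dA.items = pvBuild ps) :
    (parts.foldlM pvStepA dA).map PySem.Dict.items =
      (parts.foldlM pvParseStep ps).map pvBuild := by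
  induction parts generalizing dA ps with
  | nil => simpa using h
  | cons p rest ih =>
      rw [List.foldlM_cons, List.foldlM_cons]
      by_cases hpe : p = ""
      · simp only [pvStepA, pvParseStep, hpe]
        simpa using ih dA ps h
      · cases hs : PySem.Str.splitMax? p ":" 1 with
        | none => simp [pvStepA, pvParseStep, hpe, hs]
        | some l =>
            match l with
            | [] => simp [pvStepA, pvParseStep, hpe, hs]
            | [k] => simp [pvStepA, pvParseStep, hpe, hs]
            | k :: val :: t =>
                simp only [pvStepA, pvParseStep, hpe, hs, ne_eq, not_false_iff, if_true]
                exact ih _ _ (pvInv_step dA ps k (PySem.Str.strip val) h)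

-- ===== VERDICT (by name: the statement is the Claim_ definition above) =====
theorem generateHeadersFromRequestLine_spec : Claim_equal_generateHeadersFromRequestLine := by
  intro headerLine _ _
  unfold Spec_generateHeadersFromRequestLine
  cases headerLine with
  | none => rfl
  | some s =>
      unfold generateHeadersFromRequestLine generateHeadersFromRequestLine_alt
      by_cases hs : s = ""
      · simp [hs]
      · simp only [hs, if_false]
        exact pvLoop _ PySem.Dict.empty [] (by simp [pvBuild, PySem.Dict.empty])
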